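-- pv_equiv track=rewrite | github.com/DimitryRukhadze/validate_task | validate_task_string.py | first_eq_last
-- ===== SOURCE A (Python) =====
-- def first_eq_last(ver_str: str) -> bool:
--     check_str = ''
--     # TODO: что тут происходит, вообще непонятно
--     for index, symb in enumerate(ver_str):
--         if not symb.isdigit():
--             check_str = ver_str[index:]
--     if check_str[0] is check_str[-1]:
--         return True
--     return False
-- ===== SOURCE B (Python) =====
-- def first_eq_last(ver_str: str) -> bool:
--     # One backwards pass: the last non-digit character starts A's suffix,
--     # and the suffix's last character is simply ver_str[-1].
--     last_non_digit = next(c for c in reversed(ver_str) if not c.isdigit())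
--     return last_non_digit == ver_str[-1]
-- ===== Notes on version B (the rewrite author's own statement) =====
-- stated objective: faster
-- what changed: A rebuilds the suffix ver_str[index:] at every non-digit character (quadratic slicing) and then compares its first and last character; B does a single backwards scan for the last non-digit character and compares it with ver_str[-1].
import Mathlib
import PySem

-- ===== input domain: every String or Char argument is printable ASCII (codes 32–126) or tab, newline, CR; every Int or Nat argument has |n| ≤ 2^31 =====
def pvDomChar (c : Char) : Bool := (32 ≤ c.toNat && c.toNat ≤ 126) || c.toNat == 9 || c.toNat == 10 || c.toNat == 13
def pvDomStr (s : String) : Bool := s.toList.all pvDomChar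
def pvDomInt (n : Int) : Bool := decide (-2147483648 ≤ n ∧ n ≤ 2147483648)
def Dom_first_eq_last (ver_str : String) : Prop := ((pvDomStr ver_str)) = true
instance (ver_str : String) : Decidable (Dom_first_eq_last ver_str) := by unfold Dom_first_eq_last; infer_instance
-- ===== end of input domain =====

-- B replaces A's quadratic "re-slice at every non-digit" loop by one backwards scan for the
-- last non-digit character, compared with the string's last character ('objective': faster).
-- On ASCII, Python's `check_str[0] is check_str[-1]` on single-char strings is `==` (interning).

-- ===== PORT A =====
-- literal transliteration of A: keep re-assigning check_str = ver_str[index:] at every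
-- non-digit, then compare check_str[0] with check_str[-1] (IndexError -> none, outside Pre_).
def first_eq_last (ver_str : String) : Bool :=
  let cs := ver_str.toList
  let check := (PySem.List.enumerate cs 0).foldl
    (fun acc (p : Int × Char) =>
      if PySem.Chars.isdigit p.2 then acc else PySem.List.slice cs (some p.1) none) []
  match PySem.List.pyGet? check 0, PySem.List.pyGet? check (-1) with
  | some a, some b => a == b    -- `is` on interned single ASCII chars = equality
  | _, _ => false               -- IndexError in Python: excluded by Pre_

-- ===== PORT B =====
-- transliteration of Source B: next(c for c in reversed(ver_str) if not c.isdigit()) == ver_str[-1]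
def first_eq_last_alt (ver_str : String) : Bool :=
  let cs := ver_str.toList
  match cs.reverse.find? (fun c => ! PySem.Chars.isdigit c) with
  | some c =>
    match PySem.List.pyGet? cs (-1) with
    | some last => c == last
    | none => false             -- unreachable: find? succeeded, so cs ≠ []
  | none => false               -- StopIteration in Python: excluded by Pre_

-- ===== PRECONDITION & SPEC =====
-- Pre_ excludes exactly the strings whose characters are all digits (including the empty
-- string): there A raises IndexError (and B raises StopIteration).
def Pre_first_eq_last (ver_str : String) : Prop :=
  ver_str.toList.any (fun c => ! PySem.Chars.isdigit c) = true
instance (ver_str : String) : Decidable (Pre_first_eq_last ver_str) := by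
  unfold Pre_first_eq_last; infer_instance
def pvWitness_first_eq_last : String := "v1.0"

def Spec_first_eq_last (ver_str : String) (out : Bool) : Prop := out = first_eq_last_alt ver_str
instance (ver_str : String) (out : Bool) : Decidable (Spec_first_eq_last ver_str out) := by unfold Spec_first_eq_last; infer_instance

-- ===== CLAIM (what is proved, stated in full; the proofs are below) =====
def Claim_equal_first_eq_last : Prop := ∀ (ver_str : String), Dom_first_eq_last ver_str → Pre_first_eq_last ver_str → Spec_first_eq_last ver_str (first_eq_last ver_str)

-- ===== LEMMAS AND PROOFS =====

-- index (from the left) of the last non-digit character, if any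
def lastND : List Char → Option Nat
  | [] => none
  | c :: t =>
    match lastND t with
    | some j => some (j + 1)
    | none => if PySem.Chars.isdigit c then none else some 0

-- A's loop computes ver_str[j:] for j the last non-digit index (or keeps init if none).
theorem foldA (full : List Char) (l : List Char) (k : Int) (init : List Char) :
    (PySem.List.enumerate l k).foldl
      (fun acc (p : Int × Char) =>
        if PySem.Chars.isdigit p.2 then acc else PySem.List.slice full (some p.1) none) init
    = match lastND l with
      | some j => PySem.List.slice full (some (k + j)) none
      | none => init := by
  induction l generalizing k init with
  | nil => simp [PySem.List.enumerate, lastND]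
  | cons c t ih =>
    rw [PySem.List.enumerate_cons, List.foldl_cons, ih]
    cases ht : lastND t with
    | some j =>
      simp only [lastND, ht]
      have : k + 1 + (j : Int) = k + ((j : Int) + 1) := by ring
      simp [this]
    | none =>
      simp only [lastND, ht]
      by_cases hc : PySem.Chars.isdigit c <;> simp [hc]

-- lastND never points past the end of the list
theorem lastND_lt (l : List Char) (j : Nat) (h : lastND l = some j) : j < l.length := by
  induction l generalizing j with
  | nil => simp [lastND] at h
  | cons c t ih =>
    simp only [lastND] at h
    cases ht : lastND t with
    | some j' =>
      rw [ht] at h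
      obtain rfl : j' + 1 = j := by simpa using h
      have := ih j' ht
      simp; omega
    | none =>
      rw [ht] at h
      by_cases hc : PySem.Chars.isdigit c
      · simp [hc] at h
      · simp [hc] at h
        simp [← h]

-- if lastND finds nothing, every character is a digit
theorem lastND_none (l : List Char) (h : lastND l = none) :
    ∀ c ∈ l, PySem.Chars.isdigit c = true := by
  induction l with
  | nil => simp
  | cons c t ih =>
    simp only [lastND] at h
    cases ht : lastND t with
    | some j' => rw [ht] at h; simp at h
    | none =>
      rw [ht] at h
      by_cases hc : PySem.Chars.isdigit c
      · intro d hd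
        rcases List.mem_cons.mp hd with rfl | hd
        · exact hc
        · exact ih ht d hd
      · simp [hc] at h

-- lastND on a concat
theorem lastND_concat (l : List Char) (a : Char) :
    lastND (l ++ [a]) = if PySem.Chars.isdigit a then lastND l else some l.length := by
  induction l with
  | nil => simp [lastND]
  | cons c t ih =>
    simp only [List.cons_append, lastND, ih]
    by_cases h : PySem.Chars.isdigit a <;> simp [h]

-- at the last non-digit index j, l[j] is exactly the first non-digit of the reversed list
theorem lastND_find (l : List Char) (j : Nat) (h : lastND l = some j) :
    ∃ c, l[j]? = some c ∧
      l.reverse.find? (fun c => ! PySem.Chars.isdigit c) = some c := by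
  induction l using List.reverseRecOn generalizing j with
  | nil => simp [lastND] at h
  | append_singleton l a ih =>
    rw [lastND_concat] at h
    by_cases ha : PySem.Chars.isdigit a
    · rw [if_pos ha] at h
      obtain ⟨c, hget, hfind⟩ := ih j h
      have hj : j < l.length := lastND_lt l j h
      refine ⟨c, ?_, ?_⟩
      · rw [List.getElem?_append_left hj]; exact hget
      · rw [List.reverse_append, List.reverse_singleton, List.singleton_append]
        simp [ha, hfind]
    · rw [if_neg ha] at h
      obtain rfl : l.length = j := by simpa using h
      refine ⟨a, by simp, ?_⟩
      rw [List.reverse_append, List.reverse_singleton, List.singleton_append]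
      simp [ha]

-- xs[-1] on a nonempty list is its last element
theorem pyGet_neg_one (l : List Char) (h : l ≠ []) :
    PySem.List.pyGet? l (-1) = some (l.getLast h) := by
  have hlen : 1 ≤ l.length := List.length_pos_iff.mpr h
  simp [PySem.List.pyGet?, PySem.List.pyIdx?, hlen, List.getLast_eq_getElem,
    List.getElem?_eq_getElem (show l.length - 1 < l.length by omega)]

-- ===== VERDICT (by name: the statement is the Claim_ definition above) =====
theorem first_eq_last_spec : Claim_equal_first_eq_last := by
  intro ver_str _ hpre
  unfold Spec_first_eq_last first_eq_last first_eq_last_alt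
  set cs := ver_str.toList with hcs
  obtain ⟨c0, hc0mem, hc0⟩ := List.any_eq_true.mp hpre
  rw [Bool.not_eq_eq_eq_not, Bool.not_true] at hc0
  -- lastND cs is some j
  cases hnd : lastND cs with
  | none => exact absurd (lastND_none cs hnd c0 hc0mem) (by simp [hc0])
  | some j =>
    have hj : j < cs.length := lastND_lt cs j hnd
    obtain ⟨c, hget, hfind⟩ := lastND_find cs j hnd
    have hc : cs[j] = c := by
      simpa [List.getElem?_eq_getElem hj] using hget
    have hcheck : (PySem.List.enumerate cs 0).foldl
        (fun acc (p : Int × Char) =>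
          if PySem.Chars.isdigit p.2 then acc else PySem.List.slice cs (some p.1) none) []
        = cs.drop j := by
      rw [foldA cs cs 0 []]
      simp only [hnd]
      have h0 : (0 : Int) + (j : Int) = ((j : Nat) : Int) := by ring
      rw [h0, PySem.List.slice_from_natCast]
    have hdrop : cs.drop j = c :: cs.drop (j + 1) := by
      rw [← hc]; exact (List.getElem_cons_drop hj).symm
    have hne : cs.drop j ≠ [] := by rw [hdrop]; simp
    have hcsne : cs ≠ [] := by
      intro hnil; rw [hnil] at hj; simp at hj
    have hget0 : PySem.List.pyGet? (cs.drop j) 0 = some c := by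
      rw [hdrop]; exact PySem.List.pyGet?_zero_cons c _
    simp only [hcheck, hget0, hfind, pyGet_neg_one _ hne, pyGet_neg_one _ hcsne,
      List.getLast_drop hne]
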